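-- pv_equiv track=rewrite | github.com/ahjcgit/ece209as_ifc | tests/test_ifc_window_with_logs.py | _answer_from_visible_facts
-- ===== SOURCE A (Python) =====
-- def _answer_from_visible_facts(prompt: str, facts: list[str]) -> str:
--     prompt_lower = prompt.lower()
--     target = None
--     for key in ("james", "maria", "sam", "launch code", "server location"):
--         if key in prompt_lower:
--             target = key
--             break
--     if target is None:
--         return "No target found in question."
--
--     filtered = []
--     for fact in facts:
--         lower = fact.lower()
--         if target == "launch code" and "launch code" in lower:
--             filtered.append(fact)
--         elif target == "server location" and "server location" in lower:
--             filtered.append(fact)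
--         elif target in lower:
--             filtered.append(fact)
--
--     if not filtered:
--         return "No visible fact available for this question."
--     # Choose the last visible contradictory claim to show what information
--     # is currently in the LLM reasoning window.
--     return filtered[-1]
-- ===== SOURCE B (Python) =====
-- def _answer_from_visible_facts(prompt: str, facts: list[str]) -> str:
--     prompt_lower = prompt.lower()
--     target = None
--     for key in ("james", "maria", "sam", "launch code", "server location"):
--         if key in prompt_lower:
--             target = key
--             break
--     if target is None:
--         return "No target found in question."
--     # The last matching fact, found by an early-exit reverse scan
--     # (the special-case branches of A all reduce to 'target in fact.lower()').
--     for fact in reversed(facts):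
--         if target in fact.lower():
--             return fact
--     return "No visible fact available for this question."
-- ===== Notes on version B (the rewrite author's own statement) =====
-- stated objective: simpler
-- what changed: B drops the redundant special-case branches (they all reduce to 'target in fact.lower()') and replaces building the full filtered list then taking filtered[-1] with an early-exit reverse scan returning the first match.
import Mathlib
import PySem

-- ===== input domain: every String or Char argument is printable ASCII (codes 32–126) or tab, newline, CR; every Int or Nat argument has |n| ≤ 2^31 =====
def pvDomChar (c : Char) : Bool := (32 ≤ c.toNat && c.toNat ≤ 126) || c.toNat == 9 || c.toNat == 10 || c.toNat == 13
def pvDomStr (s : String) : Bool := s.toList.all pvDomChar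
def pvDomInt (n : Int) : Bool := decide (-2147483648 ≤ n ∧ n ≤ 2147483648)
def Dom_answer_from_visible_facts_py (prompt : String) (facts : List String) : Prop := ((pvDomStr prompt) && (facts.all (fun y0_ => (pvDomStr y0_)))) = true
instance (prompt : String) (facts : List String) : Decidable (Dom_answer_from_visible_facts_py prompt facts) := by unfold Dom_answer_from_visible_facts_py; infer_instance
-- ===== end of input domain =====

-- B: drops A's redundant special-case branches (all reduce to 'target in fact.lower()')
-- and returns the last match by an early-exit reverse scan instead of building the filtered list.


-- ===== PORT A =====
-- the keyword tuple and the first-match loop with break (shared verbatim by both Pythons)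
def afvFindTarget (prompt_lower : String) : Option String :=
  (["james", "maria", "sam", "launch code", "server location"]).find?
    (fun key => PySem.Str.isIn key prompt_lower)

def answer_from_visible_facts_py (prompt : String) (facts : List String) : String :=
  let prompt_lower := PySem.Str.lower prompt
  match afvFindTarget prompt_lower with
  | none => "No target found in question."
  | some target =>
    let filtered := facts.foldl (fun acc fact =>
      let lower := PySem.Str.lower fact
      if target == "launch code" && PySem.Str.isIn "launch code" lower then acc ++ [fact]
      else if target == "server location" && PySem.Str.isIn "server location" lower then acc ++ [fact]
      else if PySem.Str.isIn target lower then acc ++ [fact]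
      else acc) []
    if _h : filtered = [] then "No visible fact available for this question."
    else PySem.List.pyGetD filtered (-1) ""

-- ===== PORT B =====
def answer_from_visible_facts_py_alt (prompt : String) (facts : List String) : String :=
  let prompt_lower := PySem.Str.lower prompt
  match afvFindTarget prompt_lower with
  | none => "No target found in question."
  | some target =>
    match facts.reverse.find? (fun fact => PySem.Str.isIn target (PySem.Str.lower fact)) with
    | some fact => fact
    | none => "No visible fact available for this question."

-- ===== PRECONDITION & SPEC =====
def Spec_answer_from_visible_facts_py (prompt : String) (facts : List String) (out : String) : Prop := out = answer_from_visible_facts_py_alt prompt facts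
instance (prompt : String) (facts : List String) (out : String) : Decidable (Spec_answer_from_visible_facts_py prompt facts out) := by unfold Spec_answer_from_visible_facts_py; infer_instance

-- ===== CLAIM (what is proved, stated in full; the proofs are below) =====
def Claim_equal_answer_from_visible_facts_py : Prop := ∀ (prompt : String) (facts : List String), Dom_answer_from_visible_facts_py prompt facts → Spec_answer_from_visible_facts_py prompt facts (answer_from_visible_facts_py prompt facts)

-- ===== LEMMAS AND PROOFS =====

-- A's three branches collapse to a single membership test
theorem afv_branch_collapse (target : String) (fact : String) (acc : List String) :
    (let lower := PySem.Str.lower fact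
     if target == "launch code" && PySem.Str.isIn "launch code" lower then acc ++ [fact]
     else if target == "server location" && PySem.Str.isIn "server location" lower then acc ++ [fact]
     else if PySem.Str.isIn target lower then acc ++ [fact]
     else acc)
    = (if PySem.Str.isIn target (PySem.Str.lower fact) then acc ++ [fact] else acc) := by
  by_cases h1 : target = "launch code"
  · subst h1; simp
  · by_cases h2 : target = "server location"
    · subst h2; simp
    · simp [h1, h2]

-- last element of the filtered list = first match of the reverse scan
theorem afv_foldl_congr {α β : Type} {f g : β → α → β} (h : ∀ b a, f b a = g b a) :
    ∀ (l : List α) (init : β), l.foldl f init = l.foldl g init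
  | [], _ => rfl
  | x :: l, init => by rw [List.foldl_cons, List.foldl_cons, h, afv_foldl_congr h l]

theorem afv_find?_eq_head?_filter {α : Type} (p : α → Bool) (xs : List α) :
    xs.find? p = (xs.filter p).head? := by
  induction xs with
  | nil => rfl
  | cons x xs ih =>
    rw [List.find?_cons, List.filter_cons]
    cases h : p x
    · simpa using ih
    · simp

theorem afv_getLast?_filter_eq_find?_reverse {α : Type} (p : α → Bool) (xs : List α) :
    (xs.filter p).getLast? = xs.reverse.find? p := by
  rw [afv_find?_eq_head?_filter, List.filter_reverse, List.head?_reverse]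

-- ===== VERDICT (by name: the statement is the Claim_ definition above) =====
theorem answer_from_visible_facts_py_spec : Claim_equal_answer_from_visible_facts_py := by
  intro prompt facts _
  unfold Spec_answer_from_visible_facts_py answer_from_visible_facts_py answer_from_visible_facts_py_alt
  cases htgt : afvFindTarget (PySem.Str.lower prompt) with
  | none => simp [htgt]
  | some target =>
    simp only [htgt]
    have hf : facts.foldl (fun acc fact =>
        let lower := PySem.Str.lower fact
        if target == "launch code" && PySem.Str.isIn "launch code" lower then acc ++ [fact]
        else if target == "server location" && PySem.Str.isIn "server location" lower then acc ++ [fact]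
        else if PySem.Str.isIn target lower then acc ++ [fact]
        else acc) []
        = facts.filter (fun fact => PySem.Str.isIn target (PySem.Str.lower fact)) := by
      have h2 := PySem.List.foldl_append_if_eq_filter
        (p := fun fact => PySem.Str.isIn target (PySem.Str.lower fact)) (l := facts)
        (acc := ([] : List String))
      simp only [List.nil_append] at h2
      rw [← h2]
      exact afv_foldl_congr (fun acc fact => afv_branch_collapse target fact acc) facts []
    rw [hf, ← afv_getLast?_filter_eq_find?_reverse]
    by_cases he : facts.filter (fun fact => PySem.Str.isIn target (PySem.Str.lower fact)) = []
    · rw [dif_pos he, he]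
      rfl
    · rw [dif_neg he, PySem.List.pyGetD_neg_one _ _ he,
        List.getLast?_eq_some_getLast he]
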